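-- pv_equiv track=rewrite | github.com/michelebanfi/cSAT | utils.py | validate_all_solutions
-- ===== SOURCE A (Python) =====
-- def validate_all_solutions(cnf, solutions):
--     """Validates a list of solutions against a CNF formula."""
--     validity = []
--     for sol in solutions:
--         is_valid = True
--         solution_set = set(sol)
--         for clause in cnf:
--             if not any(literal in solution_set for literal in clause):
--                 is_valid = False
--                 break
--         validity.append(is_valid)
--     return validity
-- ===== SOURCE B (Python) =====
-- def validate_all_solutions(cnf, solutions):
--     """Validates a list of solutions against a CNF formula (clause-major sweep)."""
--     sets = [set(sol) for sol in solutions]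
--     validity = [True] * len(solutions)
--     for clause in cnf:
--         validity = [v and any(l in s for l in clause) for v, s in zip(validity, sets)]
--     return validity
-- ===== Notes on version B (the rewrite author's own statement) =====
-- stated objective: alternative
-- what changed: Transposed the loop nest: instead of checking each solution against all clauses with an early break, B precomputes the solution sets once, starts from an all-True validity vector, and sweeps clause-by-clause, AND-ing each solution's flag with that clause's satisfaction in one vectorized pass.
import Mathlib
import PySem

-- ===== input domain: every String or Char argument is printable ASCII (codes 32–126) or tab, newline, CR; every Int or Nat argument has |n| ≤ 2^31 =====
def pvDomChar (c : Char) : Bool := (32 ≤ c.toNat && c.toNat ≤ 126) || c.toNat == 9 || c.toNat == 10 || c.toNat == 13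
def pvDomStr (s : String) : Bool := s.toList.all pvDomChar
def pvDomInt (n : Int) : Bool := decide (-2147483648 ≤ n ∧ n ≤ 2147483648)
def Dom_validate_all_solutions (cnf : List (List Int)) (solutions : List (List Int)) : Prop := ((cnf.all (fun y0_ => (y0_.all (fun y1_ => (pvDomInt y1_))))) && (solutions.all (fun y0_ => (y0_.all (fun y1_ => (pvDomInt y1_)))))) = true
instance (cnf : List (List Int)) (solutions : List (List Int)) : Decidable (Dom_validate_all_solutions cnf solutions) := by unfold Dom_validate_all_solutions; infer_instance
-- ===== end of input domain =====

-- B transposes A's loop nest: precomputed solution sets, an all-True validity vector,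
-- and one clause-major sweep AND-ing each flag; alternative decomposition, same cost.

-- ===== PORT A =====
-- inner 'for clause in cnf: if not any(...): is_valid = False; break' loop
def pvCheckSol (cnf : List (List Int)) (s : PySem.Set Int) : Bool :=
  match cnf with
  | [] => true
  | clause :: rest =>
    if clause.any (fun l => PySem.Set.contains s l) then pvCheckSol rest s
    else false

def validate_all_solutions (cnf : List (List Int)) (solutions : List (List Int)) : List Bool :=
  solutions.foldl (fun validity sol => validity ++ [pvCheckSol cnf (PySem.Set.ofList sol)]) []

-- ===== PORT B =====
def validate_all_solutions_alt (cnf : List (List Int)) (solutions : List (List Int)) : List Bool :=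
  let sets := solutions.map (fun sol => PySem.Set.ofList sol)
  let init := solutions.map (fun _ => true)
  cnf.foldl
    (fun validity clause =>
      (validity.zip sets).map (fun vs => vs.1 && clause.any (fun l => PySem.Set.contains vs.2 l)))
    init

-- ===== PRECONDITION & SPEC =====
def Spec_validate_all_solutions (cnf : List (List Int)) (solutions : List (List Int)) (out : List Bool) : Prop := out = validate_all_solutions_alt cnf solutions
instance (cnf : List (List Int)) (solutions : List (List Int)) (out : List Bool) : Decidable (Spec_validate_all_solutions cnf solutions out) := by unfold Spec_validate_all_solutions; infer_instance

-- ===== CLAIM (what is proved, stated in full; the proofs are below) =====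
def Claim_equal_validate_all_solutions : Prop := ∀ (cnf : List (List Int)) (solutions : List (List Int)), Dom_validate_all_solutions cnf solutions → Spec_validate_all_solutions cnf solutions (validate_all_solutions cnf solutions)

-- ===== LEMMAS AND PROOFS =====

-- A's break-loop computes the conjunction over all clauses
theorem pvCheckSol_eq_all (cnf : List (List Int)) (s : PySem.Set Int) :
    pvCheckSol cnf s = cnf.all (fun clause => clause.any (fun l => PySem.Set.contains s l)) := by
  induction cnf with
  | nil => rfl
  | cons c rest ih =>
    simp only [pvCheckSol, List.all_cons]
    cases h : c.any (fun l => PySem.Set.contains s l) <;> simp [ih]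

-- A's append-accumulator fold is a map
theorem pvFoldl_append_map {α β : Type} (f : α → β) (xs : List α) (acc : List β) :
    xs.foldl (fun v x => v ++ [f x]) acc = acc ++ xs.map f := by
  induction xs generalizing acc with
  | nil => simp
  | cons x xs ih => simp [List.foldl_cons, ih]

-- B's clause-major fold, started from a pointwise map of the solutions, stays a pointwise map
theorem pvAltFold (cnf : List (List Int)) (solutions : List (List Int))
    (g : List Int → Bool) :
    cnf.foldl
      (fun validity clause =>
        (validity.zip (solutions.map (fun sol => PySem.Set.ofList sol))).map
          (fun vs => vs.1 && clause.any (fun l => PySem.Set.contains vs.2 l)))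
      (solutions.map g)
    = solutions.map (fun sol =>
        g sol && cnf.all (fun clause =>
          clause.any (fun l => PySem.Set.contains (PySem.Set.ofList sol) l))) := by
  induction cnf generalizing g with
  | nil => simp
  | cons c rest ih =>
    simp only [List.foldl_cons]
    have hz : (List.map g solutions).zip (solutions.map (fun sol => PySem.Set.ofList sol))
        = solutions.map (fun sol => (g sol, PySem.Set.ofList sol)) := by
      rw [List.zip_map']
    rw [hz, List.map_map]
    have := ih (fun sol => g sol && c.any (fun l => PySem.Set.contains (PySem.Set.ofList sol) l))
    rw [show (List.map ((fun vs : Bool × PySem.Set Int =>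
          vs.1 && c.any (fun l => PySem.Set.contains vs.2 l)) ∘
          (fun sol => (g sol, PySem.Set.ofList sol))) solutions)
        = solutions.map (fun sol => g sol && c.any (fun l => PySem.Set.contains (PySem.Set.ofList sol) l)) from rfl,
      this]
    simp [Bool.and_assoc]

-- ===== VERDICT (by name: the statement is the Claim_ definition above) =====
theorem validate_all_solutions_spec : Claim_equal_validate_all_solutions := by
  intro cnf solutions _
  show validate_all_solutions cnf solutions = validate_all_solutions_alt cnf solutions
  unfold validate_all_solutions validate_all_solutions_alt
  rw [pvFoldl_append_map, List.nil_append, pvAltFold cnf solutions (fun _ => true)]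
  simp [pvCheckSol_eq_all]
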